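-- pv_equiv track=rewrite | github.com/NickStafford2/WOWY_Advanced_Analytics | src/wowy/web/app.py | _build_csv_column_order
-- ===== SOURCE A (Python) =====
-- from typing import Any, TypedDict
--
-- def _build_csv_column_order(table_rows: list[dict[str, Any]]) -> list[str]:
--     preferred_order = [
--         "rank",
--         "player_id",
--         "player_name",
--         "span_average_value",
--         "average_minutes",
--         "total_minutes",
--         "games_with",
--         "games_without",
--         "avg_margin_with",
--         "avg_margin_without",
--         "season_count",
--         "points",
--     ]
--     available_columns = {
--         key
--         for row in table_rows
--         for key in row
--     }
--     ordered_columns = [column for column in preferred_order if column in available_columns]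
--     ordered_columns.extend(sorted(available_columns - set(ordered_columns)))
--     return ordered_columns
-- ===== SOURCE B (Python) =====
-- def _build_csv_column_order(table_rows):
--     preferred_order = [
--         "rank",
--         "player_id",
--         "player_name",
--         "span_average_value",
--         "average_minutes",
--         "total_minutes",
--         "games_with",
--         "games_without",
--         "avg_margin_with",
--         "avg_margin_without",
--         "season_count",
--         "points",
--     ]
--     rank = {name: i for i, name in enumerate(preferred_order)}
--     columns = {key for row in table_rows for key in row}
--     return sorted(columns, key=lambda c: (rank.get(c, len(rank)), "" if c in rank else c))
-- ===== Notes on version B (the rewrite author's own statement) =====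
-- stated objective: simpler
-- what changed: Replaced A's filter-preferred / set-difference / sort-the-rest / concatenate pipeline by a single sorted() over the key set with a composite sort key (preferred rank, then column name), producing the identical order in one keyed sort.
import Mathlib
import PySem

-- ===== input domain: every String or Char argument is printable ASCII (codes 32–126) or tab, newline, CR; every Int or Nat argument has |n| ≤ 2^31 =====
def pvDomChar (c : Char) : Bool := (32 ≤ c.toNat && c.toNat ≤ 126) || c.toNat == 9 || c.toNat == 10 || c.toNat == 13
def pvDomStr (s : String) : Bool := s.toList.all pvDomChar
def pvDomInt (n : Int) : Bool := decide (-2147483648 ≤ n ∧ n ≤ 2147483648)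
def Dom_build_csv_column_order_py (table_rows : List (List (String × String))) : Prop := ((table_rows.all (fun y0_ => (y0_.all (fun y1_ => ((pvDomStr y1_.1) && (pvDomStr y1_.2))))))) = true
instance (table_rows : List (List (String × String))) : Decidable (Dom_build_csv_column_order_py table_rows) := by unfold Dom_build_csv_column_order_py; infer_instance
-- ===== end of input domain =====

-- B replaces A's filter/set-difference/sort/concatenate pipeline by one keyed sort (simpler); same result proved below.

-- ===== PORT A =====
-- the literal preferred_order list both Pythons spell out
def pvPreferredOrder : List String :=
  ["rank", "player_id", "player_name", "span_average_value", "average_minutes",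
   "total_minutes", "games_with", "games_without", "avg_margin_with",
   "avg_margin_without", "season_count", "points"]

def build_csv_column_order_py (table_rows : List (List (String × String))) : List String :=
  let preferred_order := pvPreferredOrder
  -- {key for row in table_rows for key in row}
  let available_columns : PySem.Set String :=
    PySem.Set.ofList (table_rows.flatMap (fun row => row.map Prod.fst))
  let ordered_columns :=
    preferred_order.filter (fun column => PySem.Set.contains available_columns column)
  ordered_columns ++
    PySem.List.sorted
      (PySem.Set.diff available_columns (PySem.Set.ofList ordered_columns))
      (fun x => x) false

-- ===== PORT B =====
-- rank = {name: i for i, name in enumerate(preferred_order)}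
def pvRank : PySem.Dict String Int :=
  (PySem.List.enumerate pvPreferredOrder).foldl
    (fun d p => d.insert p.2 p.1) PySem.Dict.empty

-- lambda c: (rank.get(c, len(rank)), "" if c in rank else c)   (Python tuple < is Lex <)
def pvKeyB (c : String) : Lex (Int × String) :=
  toLex (PySem.Dict.getD pvRank c (PySem.Dict.size pvRank : Int),
         if PySem.Dict.contains pvRank c then "" else c)

def build_csv_column_order_py_alt (table_rows : List (List (String × String))) : List String :=
  let columns : PySem.Set String :=
    PySem.Set.ofList (table_rows.flatMap (fun row => row.map Prod.fst))
  PySem.List.sorted columns pvKeyB false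

-- ===== PRECONDITION & SPEC =====
def Spec_build_csv_column_order_py (table_rows : List (List (String × String))) (out : List String) : Prop := out = build_csv_column_order_py_alt table_rows
instance (table_rows : List (List (String × String))) (out : List String) : Decidable (Spec_build_csv_column_order_py table_rows out) := by unfold Spec_build_csv_column_order_py; infer_instance

-- ===== CLAIM (what is proved, stated in full; the proofs are below) =====
def Claim_equal_build_csv_column_order_py : Prop := ∀ (table_rows : List (List (String × String))), Dom_build_csv_column_order_py table_rows → Spec_build_csv_column_order_py table_rows (build_csv_column_order_py table_rows)

-- ===== LEMMAS AND PROOFS =====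

-- pvRank's keys are exactly pvPreferredOrder (closed computation)
theorem pvRank_keys : (PySem.Dict.keys pvRank) = pvPreferredOrder := by decide

theorem contains_pvRank_iff (c : String) :
    PySem.Dict.contains pvRank c = true ↔ c ∈ pvPreferredOrder := by
  rw [PySem.Dict.contains_iff_mem_keys, pvRank_keys]

-- on preferred columns, the rank lookup is the column's index, below 12
theorem getD_pvRank_lt (c : String) (h : c ∈ pvPreferredOrder) :
    PySem.Dict.getD pvRank c (PySem.Dict.size pvRank : Int) < 12 := by
  fin_cases h <;> decide

-- keys of preferred columns are strictly increasing under pvKeyB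
theorem preferred_pairwise :
    pvPreferredOrder.Pairwise (fun a b => pvKeyB a < pvKeyB b) := by decide

theorem key_of_not_preferred (c : String) (h : c ∉ pvPreferredOrder) :
    pvKeyB c = toLex ((12 : Int), c) := by
  have hc : PySem.Dict.contains pvRank c = false := by
    rcases Bool.eq_false_or_eq_true (PySem.Dict.contains pvRank c) with h' | h'
    · exact absurd ((contains_pvRank_iff c).mp h') h
    · exact h'
  have hg : PySem.Dict.getD pvRank c (PySem.Dict.size pvRank : Int)
      = (PySem.Dict.size pvRank : Int) :=
    PySem.Dict.getD_of_not_contains _ _ hc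
  simp [pvKeyB, hc, hg]
  decide

theorem build_csv_column_order_py_eq (table_rows : List (List (String × String))) :
    build_csv_column_order_py table_rows = build_csv_column_order_py_alt table_rows := by
  unfold build_csv_column_order_py build_csv_column_order_py_alt
  set cols : PySem.Set String :=
    PySem.Set.ofList (table_rows.flatMap (fun row => row.map Prod.fst)) with hcols
  set ordered := pvPreferredOrder.filter (fun column => PySem.Set.contains cols column)
    with hordered
  set rest := PySem.List.sorted (PySem.Set.diff cols (PySem.Set.ofList ordered))
    (fun x => x) false with hrest
  -- elements of rest are available but not preferred
  have hrest_mem : ∀ x ∈ rest, x ∈ cols ∧ x ∉ pvPreferredOrder := by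
    intro x hx
    rw [hrest, PySem.List.mem_sorted, PySem.Set.mem_diff] at hx
    rcases hx with ⟨hA, hB⟩
    refine ⟨hA, fun hp => hB ?_⟩
    exact (PySem.Set.mem_ofList _ _).mpr
      (List.mem_filter.mpr ⟨hp, (PySem.Set.contains_iff cols x).mpr hA⟩)
  -- rest is strictly increasing under pvKeyB
  have hrest_pw : rest.Pairwise (fun a b => pvKeyB a < pvKeyB b) := by
    have hnd : rest.Nodup := by
      rw [hrest]
      exact ((PySem.List.sorted_perm _ _ _).nodup_iff).mpr
        (PySem.Set.nodup_diff _ _ (PySem.Set.nodup_ofList _))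
    have hle : rest.Pairwise (fun a b : String => a ≤ b) := by
      rw [hrest]; exact PySem.List.sorted_pairwise _ _
    have hlt : rest.Pairwise (fun a b : String => a < b) :=
      (hnd.and hle).imp (fun h => lt_of_le_of_ne h.2 h.1)
    refine hlt.imp_of_mem (fun {a b} ha hb hab => ?_)
    rw [key_of_not_preferred a (hrest_mem a ha).2,
        key_of_not_preferred b (hrest_mem b hb).2]
    rw [Prod.Lex.lt_iff]
    exact Or.inr ⟨rfl, hab⟩
  -- the whole A-output is strictly increasing under pvKeyB
  have hpw : (ordered ++ rest).Pairwise (fun a b => pvKeyB a < pvKeyB b) := by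
    rw [List.pairwise_append]
    refine ⟨preferred_pairwise.sublist (List.filter_sublist ..), hrest_pw, ?_⟩
    intro a ha b hb
    have hap : a ∈ pvPreferredOrder := (List.mem_filter.mp ha).1
    rw [key_of_not_preferred b (hrest_mem b hb).2]
    have hk : pvKeyB a = toLex (PySem.Dict.getD pvRank a (PySem.Dict.size pvRank : Int), "") := by
      simp [pvKeyB, (contains_pvRank_iff a).mpr hap]
    rw [hk, Prod.Lex.lt_iff]
    exact Or.inl (getD_pvRank_lt a hap)
  -- the A-output is a permutation of the available columns
  have hperm : (ordered ++ rest).Perm cols := by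
    have hnd : (ordered ++ rest).Nodup :=
      hpw.imp (fun h => by rintro rfl; exact lt_irrefl _ h)
    rw [List.perm_ext_iff_of_nodup hnd (PySem.Set.nodup_ofList _)]
    intro x
    constructor
    · intro hx
      rcases List.mem_append.mp hx with hx | hx
      · exact (PySem.Set.contains_iff cols x).mp (List.mem_filter.mp hx).2
      · exact (hrest_mem x hx).1
    · intro hx
      by_cases hp : x ∈ pvPreferredOrder
      · exact List.mem_append.mpr (Or.inl (List.mem_filter.mpr
          ⟨hp, (PySem.Set.contains_iff cols x).mpr hx⟩))
      · refine List.mem_append.mpr (Or.inr ?_)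
        rw [hrest, PySem.List.mem_sorted]
        exact (PySem.Set.mem_diff _ _ _).mpr
          ⟨hx, fun hf => hp (List.mem_filter.mp ((PySem.Set.mem_ofList _ _).mp hf)).1⟩
  exact (PySem.List.sorted_eq_of_perm_of_pairwise_lt cols (ordered ++ rest) pvKeyB hperm hpw).symm

-- ===== VERDICT (by name: the statement is the Claim_ definition above) =====
theorem build_csv_column_order_py_spec : Claim_equal_build_csv_column_order_py := by
  intro table_rows _
  unfold Spec_build_csv_column_order_py
  exact build_csv_column_order_py_eq table_rows
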